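-- pv_equiv track=rewrite | github.com/pypi-data/pypi-mirror-399 | packages/kavachnet/kavachnet-1.1.0.tar.gz/kavachnet-1.1.0/src/kavachnet/vpn_checker.py | get_clean_blocks
-- ===== SOURCE A (Python) =====
-- import ipaddress
--
-- def get_clean_blocks(org_ranges, vpn_results):
--     """Identifies which organization ranges do NOT contain any detected VPNs."""
--     ranges_with_vpns = set(r['Organization Range'] for r in vpn_results)
--     clean_blocks = []
--     for start, end, asn, org, ver in org_ranges:
--         range_str = f"{ipaddress.ip_address(start)} - {ipaddress.ip_address(end)}"
--         if range_str not in ranges_with_vpns: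
--             clean_blocks.append({"Start IP": str(ipaddress.ip_address(start)), "End IP": str(ipaddress.ip_address(end)), "ASN": f"AS{asn}", "Organization": org, "Version": ver})
--     return clean_blocks
-- ===== SOURCE B (Python) =====
-- def _dotted_quad(n):
--     """Render a non-negative integer IPv4 address as a dotted quad, e.g. 16909060 -> '1.2.3.4'."""
--     octets = []
--     for _ in range(4):
--         n, octet = divmod(n, 256)
--         octets.append(str(octet))
--     return '.'.join(reversed(octets))
--
-- def get_clean_blocks(org_ranges, vpn_results):
--     """Identifies which organization ranges do NOT contain any detected VPNs."""
--     pairs = []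
--     for start, end, asn, org, ver in org_ranges:
--         s, e = _dotted_quad(start), _dotted_quad(end)
--         pairs.append((f"{s} - {e}",
--                       {"Start IP": s, "End IP": e, "ASN": f"AS{asn}",
--                        "Organization": org, "Version": ver}))
--     for r in vpn_results:
--         hit = r['Organization Range']
--         pairs = [(key, block) for key, block in pairs if key != hit]
--     return [block for _, block in pairs]
-- ===== Notes on version B (the rewrite author's own statement) =====
-- stated objective: alternative
-- what changed: Sieve strategy: B first builds blocks for ALL org ranges keyed by their range string, then makes one shrinking filter pass per VPN record to delete matching blocks, instead of A's pre-built set of VPN range strings tested while building the output; the ipaddress import is unavailable to B, so it renders the dotted quad directly (exact for the non-negative 32-bit ints Pre_ and the domain admit); Pre_ excludes inputs where A raises (negative IP ints -> ValueError, or a vpn_results row missing the 'Organization Range' key -> KeyError).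
import Mathlib
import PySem

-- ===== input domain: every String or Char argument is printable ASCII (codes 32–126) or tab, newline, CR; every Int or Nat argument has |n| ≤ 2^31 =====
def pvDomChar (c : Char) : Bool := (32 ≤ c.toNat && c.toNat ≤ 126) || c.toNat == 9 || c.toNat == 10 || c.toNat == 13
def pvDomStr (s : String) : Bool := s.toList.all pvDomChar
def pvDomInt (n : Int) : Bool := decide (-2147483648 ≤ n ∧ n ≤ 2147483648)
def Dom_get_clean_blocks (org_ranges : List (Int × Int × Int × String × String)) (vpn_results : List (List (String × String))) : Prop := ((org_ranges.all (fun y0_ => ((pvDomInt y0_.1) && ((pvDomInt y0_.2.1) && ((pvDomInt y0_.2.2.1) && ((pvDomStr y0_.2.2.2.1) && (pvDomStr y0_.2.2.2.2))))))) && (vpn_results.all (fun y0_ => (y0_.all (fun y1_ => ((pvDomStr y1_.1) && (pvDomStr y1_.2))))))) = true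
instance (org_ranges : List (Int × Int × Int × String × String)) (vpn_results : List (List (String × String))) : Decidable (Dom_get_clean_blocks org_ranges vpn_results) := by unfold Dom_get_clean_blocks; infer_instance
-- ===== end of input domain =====

-- B replaces A's set-membership filter with a sieve: build blocks for all org ranges keyed by
-- range string, then one shrinking filter pass per VPN record deletes matching blocks (alternative, not faster).


-- ===== PORT A =====
-- str(ipaddress.ip_address(n)) for an int 0 ≤ n < 2^32 (IPv4 dotted quad); exact on that range,
-- which Pre_ plus Dom guarantee.
def pvIpv4 (n : Int) : String :=
  PySem.Str.join "." [PySem.Int.toStr (PySem.Int.mod (PySem.Int.floordiv n 16777216) 256),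
                      PySem.Int.toStr (PySem.Int.mod (PySem.Int.floordiv n 65536) 256),
                      PySem.Int.toStr (PySem.Int.mod (PySem.Int.floordiv n 256) 256),
                      PySem.Int.toStr (PySem.Int.mod n 256)]

-- f"{...} - {...}"
def pvRangeStr (s e : Int) : String := PySem.Str.join " - " [pvIpv4 s, pvIpv4 e]

-- r['Organization Range']: first-match lookup; Pre_ guarantees the key is present (else KeyError)
def pvOrgKey (r : List (String × String)) : String := (List.lookup "Organization Range" r).getD ""

-- the dict literal A appends for one org_ranges tuple
def pvBlockA (t : Int × Int × Int × String × String) : List (String × String) :=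
  [("Start IP", pvIpv4 t.1), ("End IP", pvIpv4 t.2.1),
   ("ASN", PySem.Str.join "" ["AS", PySem.Int.toStr t.2.2.1]),
   ("Organization", t.2.2.2.1), ("Version", t.2.2.2.2)]

def get_clean_blocks (org_ranges : List (Int × Int × Int × String × String)) (vpn_results : List (List (String × String))) : List (List (String × String)) :=
  let ranges_with_vpns : PySem.Set String := PySem.Set.ofList (vpn_results.map pvOrgKey)
  org_ranges.foldl
    (fun clean_blocks t =>
      if !(PySem.Set.contains ranges_with_vpns (pvRangeStr t.1 t.2.1)) then
        clean_blocks ++ [pvBlockA t]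
      else clean_blocks)
    []

-- ===== PORT B =====
-- B's _dotted_quad: four divmod steps collecting octet strings, then '.'-join of the reversed list
def pvDottedQuad (n : Int) : String :=
  let st := (PySem.List.pyRange 0 4 1).foldl
    (fun (st : Int × List String) _ =>
      (PySem.Int.floordiv st.1 256, st.2 ++ [PySem.Int.toStr (PySem.Int.mod st.1 256)]))
    (n, [])
  PySem.Str.join "." st.2.reverse

def pvPair (t : Int × Int × Int × String × String) : String × List (String × String) :=
  let s := pvDottedQuad t.1
  let e := pvDottedQuad t.2.1
  (PySem.Str.join " - " [s, e],
   [("Start IP", s), ("End IP", e),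
    ("ASN", PySem.Str.join "" ["AS", PySem.Int.toStr t.2.2.1]),
    ("Organization", t.2.2.2.1), ("Version", t.2.2.2.2)])

def get_clean_blocks_alt (org_ranges : List (Int × Int × Int × String × String)) (vpn_results : List (List (String × String))) : List (List (String × String)) :=
  let pairs0 := org_ranges.foldl (fun pairs t => pairs ++ [pvPair t]) []
  let pairs := vpn_results.foldl
    (fun pairs r => pairs.filter (fun p => !(p.1 == pvOrgKey r))) pairs0
  pairs.map (fun p => p.2)

-- ===== PRECONDITION & SPEC =====
-- Pre_ excludes exactly the inputs where Python A raises: a negative start/end IP int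
-- (ipaddress.ip_address raises ValueError) or a vpn_results row without the
-- 'Organization Range' key (KeyError).
def Pre_get_clean_blocks (org_ranges : List (Int × Int × Int × String × String)) (vpn_results : List (List (String × String))) : Prop :=
  (∀ t ∈ org_ranges, 0 ≤ t.1 ∧ 0 ≤ t.2.1) ∧
  (∀ r ∈ vpn_results, (List.lookup "Organization Range" r).isSome)
instance (org_ranges : List (Int × Int × Int × String × String)) (vpn_results : List (List (String × String))) : Decidable (Pre_get_clean_blocks org_ranges vpn_results) := by unfold Pre_get_clean_blocks; infer_instance

def pvWitness_get_clean_blocks : (List (Int × Int × Int × String × String)) × (List (List (String × String))) :=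
  ([(0, 1, 2, "org", "4")], [[("Organization Range", "0.0.0.0 - 0.0.0.1")]])

def Spec_get_clean_blocks (org_ranges : List (Int × Int × Int × String × String)) (vpn_results : List (List (String × String))) (out : List (List (String × String))) : Prop := out = get_clean_blocks_alt org_ranges vpn_results
instance (org_ranges : List (Int × Int × Int × String × String)) (vpn_results : List (List (String × String))) (out : List (List (String × String))) : Decidable (Spec_get_clean_blocks org_ranges vpn_results out) := by unfold Spec_get_clean_blocks; infer_instance

-- ===== CLAIM =====
def Claim_equal_get_clean_blocks : Prop := ∀ (org_ranges : List (Int × Int × Int × String × String)) (vpn_results : List (List (String × String))), Dom_get_clean_blocks org_ranges vpn_results → Pre_get_clean_blocks org_ranges vpn_results → Spec_get_clean_blocks org_ranges vpn_results (get_clean_blocks org_ranges vpn_results)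

-- ===== LEMMAS AND PROOFS =====
-- B's divmod loop renders the same dotted quad as A's direct place-value formula (for 0 ≤ n)
theorem pv_dq_eq (n : Int) (hn : 0 ≤ n) : pvDottedQuad n = pvIpv4 n := by
  obtain ⟨k, rfl⟩ := Int.eq_ofNat_of_zero_le hn
  simp [pvDottedQuad, pvIpv4, PySem.List.pyRange, PySem.Int.floordiv, PySem.Int.mod,
    Int.fdiv_eq_ediv, List.range_succ]
  norm_num [Int.ediv_ediv_of_nonneg]

-- B's successive per-record filter passes collapse into one filter by the conjunction of all tests
theorem pv_foldl_filter (l : List (List (String × String)))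
    (ps : List (String × List (String × String))) :
    l.foldl (fun pairs r => pairs.filter (fun p => !(p.1 == pvOrgKey r))) ps
      = ps.filter (fun p => l.all (fun r => !(p.1 == pvOrgKey r))) := by
  induction l generalizing ps with
  | nil => simp
  | cons r l ih => simp [ih, List.filter_filter, Bool.and_comm]

-- membership in A's set of VPN range strings = the negation of B's surviving-all-passes test
theorem pv_contains_eq_any (vpn_results : List (List (String × String))) (x : String) :
    PySem.Set.contains (PySem.Set.ofList (vpn_results.map pvOrgKey)) x
      = !(vpn_results.all (fun r => !(pvOrgKey r == x))) := by
  rw [Bool.eq_iff_iff]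
  simp [PySem.Set.mem_ofList, List.mem_map]

-- ===== VERDICT =====
theorem get_clean_blocks_spec : Claim_equal_get_clean_blocks := by
  intro org_ranges vpn_results _ hpre
  unfold Spec_get_clean_blocks
  simp only [get_clean_blocks, get_clean_blocks_alt,
    PySem.List.foldl_append_if, PySem.List.foldl_append_singleton_eq_map, List.nil_append]
  rw [pv_foldl_filter, List.filter_map, List.map_map]
  have hfilter : org_ranges.filter
        (fun t => !(PySem.Set.contains (PySem.Set.ofList (vpn_results.map pvOrgKey)) (pvRangeStr t.1 t.2.1)))
      = org_ranges.filter
        (fun t => (vpn_results.all (fun r => !((pvPair t).1 == pvOrgKey r)))) := by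
    apply List.filter_congr
    intro t ht
    obtain ⟨h1, h2⟩ := hpre.1 t ht
    simp only [pv_contains_eq_any, Bool.not_not, pvPair, pvRangeStr, pv_dq_eq _ h1, pv_dq_eq _ h2]
    simp [BEq.comm]
  rw [hfilter]
  apply List.map_congr_left
  intro t ht
  obtain ⟨h1, h2⟩ := hpre.1 t (List.mem_of_mem_filter ht)
  simp [Function.comp, pvPair, pvBlockA, pv_dq_eq _ h1, pv_dq_eq _ h2]
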